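-- pv_equiv track=rewrite | github.com/Fan1c/Laba | Laba5(1 part).py | generate_matrices_algorithmic
-- ===== SOURCE A (Python) =====
-- import itertools
--
-- def generate_matrices_algorithmic(matrix):
--     #Генерирует перестановки строк и столбцов матрицы
--     n = len(matrix)
--     row_permutations = list(itertools.permutations(range(n)))
--     col_permutations = list(itertools.permutations(range(n)))
--
--     matrices = []
--     for row_perm in row_permutations:
--         for col_perm in col_permutations:
--             new_matrix = [[0] * n for _ in range(n)] # Создаем новую матрицу (список списков)
--             for i in range(n):
--                 for j in range(n):
--                     new_matrix[i][j] = matrix[row_perm[i]][col_perm[j]]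
--             matrices.append(new_matrix)
--     return matrices
-- ===== SOURCE B (Python) =====
-- def _orderings(xs):
--     # all orderings of xs by recursive first-element selection
--     # (index-lexicographic order, same order as itertools.permutations)
--     if not xs:
--         return [[]]
--     out = []
--     for i, x in enumerate(xs):
--         for rest in _orderings(xs[:i] + xs[i + 1:]):
--             out.append([x] + rest)
--     return out
--
--
-- def generate_matrices_algorithmic(matrix):
--     n = len(matrix)
--
--     def transpose(m):
--         return [[row[i] for row in m] for i in range(n)]
--
--     result = []
--     for r in _orderings(matrix):          # row permutation = reordering of rows
--         for t in _orderings(transpose(r)):  # column permutation = reordering of columns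
--             result.append(transpose(t))
--     return result
-- ===== Notes on version B (the rewrite author's own statement) =====
-- stated objective: alternative
-- what changed: Drops itertools and index-permutation tuples entirely: B generates all orderings of the actual rows by a recursive first-element-selection algorithm and handles column permutations by transposing, reordering the transpose's rows with the same recursion, and transposing back; A fills a zero matrix cell-by-cell from two itertools index-permutation lists.
import Mathlib
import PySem

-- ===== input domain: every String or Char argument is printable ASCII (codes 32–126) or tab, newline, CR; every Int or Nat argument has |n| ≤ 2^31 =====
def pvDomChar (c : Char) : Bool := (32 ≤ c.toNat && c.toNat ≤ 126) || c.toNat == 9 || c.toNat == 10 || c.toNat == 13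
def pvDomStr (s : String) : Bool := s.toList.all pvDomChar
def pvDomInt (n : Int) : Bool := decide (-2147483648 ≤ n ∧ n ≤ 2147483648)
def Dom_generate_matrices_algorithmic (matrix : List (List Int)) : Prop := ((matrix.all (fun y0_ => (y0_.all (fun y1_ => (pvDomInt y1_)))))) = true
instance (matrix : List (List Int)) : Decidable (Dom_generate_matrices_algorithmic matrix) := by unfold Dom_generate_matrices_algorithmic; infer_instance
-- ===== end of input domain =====

-- B replaces A's itertools index permutations + cell-by-cell fill of a zero matrix by a recursive
-- first-element-selection generator of row orderings, doing column permutations by transposing,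
-- reordering the transpose's rows and transposing back (same cost, different algorithm).

-- ===== PORT A =====
def generate_matrices_algorithmic (matrix : List (List Int)) : List (List (List Int)) :=
  let n := matrix.length
  let row_permutations := PySem.List.permutations (PySem.List.pyRange 0 n 1) n
  let col_permutations := PySem.List.permutations (PySem.List.pyRange 0 n 1) n
  row_permutations.foldl (fun matrices row_perm =>
    col_permutations.foldl (fun matrices col_perm =>
      -- new_matrix = [[0]*n for _ in range(n)]; then new_matrix[i][j] = matrix[row_perm[i]][col_perm[j]]
      let init := (PySem.List.pyRange 0 n 1).map (fun _ => List.replicate n (0 : Int))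
      let new_matrix := (PySem.List.pyRange 0 n 1).foldl (fun m i =>
        (PySem.List.pyRange 0 n 1).foldl (fun mm j =>
          PySem.List.pySetD mm i (PySem.List.pySetD (PySem.List.pyGetD mm i [])
            j (PySem.List.pyGetD (PySem.List.pyGetD matrix (PySem.List.pyGetD row_perm i 0) [])
                 (PySem.List.pyGetD col_perm j 0) 0))) m) init
      matrices ++ [new_matrix]) matrices) []

-- ===== PORT B =====
-- _orderings: all orderings of xs by recursive first-element selection; the Nat is the recursion
-- fuel (an artifact of Lean termination, = length of the list; Python recurses on the list itself).
-- Python's xs[:i] + xs[i+1:] is ported with PySem.List.slice (exact for these nonnegative bounds).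
def pvOrderings : Nat → List (List Int) → List (List (List Int))
  | _, [] => [[]]
  | 0, _ :: _ => []
  | fuel + 1, y :: ys =>
      (PySem.List.enumerate (y :: ys)).flatMap (fun ix =>
        (pvOrderings fuel (PySem.List.slice (y :: ys) none (some ix.1) ++
                           PySem.List.slice (y :: ys) (some (ix.1 + 1)) none)).map
          (fun rest => ix.2 :: rest))

-- transpose(m) = [[row[i] for row in m] for i in range(n)]  (n captured from the enclosing scope)
def pvTranspose (n : Int) (m : List (List Int)) : List (List Int) :=
  (PySem.List.pyRange 0 n 1).map (fun i => m.map (fun row => PySem.List.pyGetD row i 0))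

def generate_matrices_algorithmic_alt (matrix : List (List Int)) : List (List (List Int)) :=
  let n : Int := matrix.length
  (pvOrderings matrix.length matrix).foldl (fun result r =>
    (pvOrderings (pvTranspose n r).length (pvTranspose n r)).foldl (fun result t =>
      result ++ [pvTranspose n t]) result) []

-- ===== PRECONDITION & SPEC =====
-- Python A (and B) raises IndexError when some row is shorter than the number of rows
-- (matrix[r][c] resp. row[i] is read for every index < len(matrix)); Pre_ excludes exactly those inputs.
def Pre_generate_matrices_algorithmic (matrix : List (List Int)) : Prop :=
  ∀ row ∈ matrix, matrix.length ≤ row.length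
instance (matrix : List (List Int)) : Decidable (Pre_generate_matrices_algorithmic matrix) := by
  unfold Pre_generate_matrices_algorithmic; infer_instance
def pvWitness_generate_matrices_algorithmic : List (List Int) := [[1, 2], [3, 4]]
def Spec_generate_matrices_algorithmic (matrix : List (List Int)) (out : List (List (List Int))) : Prop := out = generate_matrices_algorithmic_alt matrix
instance (matrix : List (List Int)) (out : List (List (List Int))) : Decidable (Spec_generate_matrices_algorithmic matrix out) := by unfold Spec_generate_matrices_algorithmic; infer_instance

-- ===== CLAIM (what is proved, stated in full; the proofs are below) =====
def Claim_equal_generate_matrices_algorithmic : Prop := ∀ (matrix : List (List Int)), Dom_generate_matrices_algorithmic matrix → Pre_generate_matrices_algorithmic matrix → Spec_generate_matrices_algorithmic matrix (generate_matrices_algorithmic matrix)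

-- ===== LEMMAS AND PROOFS =====

-- ---- A-side: the cell-by-cell fill builds the row/column selection matrix ----

theorem take_set_succ {α : Type} (row : List α) (a : Nat) (v : α) (h : a < row.length) :
    (row.set a v).take (a+1) = row.take a ++ [v] := by
  rw [List.take_set]
  rw [show row.take (a+1) = row.take a ++ [row[a]] from by
    rw [List.take_add_one]; simp [List.getElem?_eq_getElem h]]
  rw [List.set_append]
  simp [Nat.min_eq_left h.le]

-- Filling a row cell-by-cell over range(a, len(row)) replaces its tail by the map of the fill function.
theorem fill_from {α : Type} (f : Int → α) : ∀ (k : Nat) (row : List α) (a : Nat),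
    row.length = a + k →
    (PySem.List.pyRange (a : Int) (row.length : Int) 1).foldl
        (fun r j => PySem.List.pySetD r j (f j)) row
      = row.take a ++ (PySem.List.pyRange (a : Int) (row.length : Int) 1).map f := by
  intro k
  induction k with
  | zero =>
    intro row a h
    rw [PySem.List.pyRange_one_eq_nil (show (row.length : Int) ≤ (a : Int) by omega)]
    simp [List.take_of_length_le (show row.length ≤ a by omega)]
  | succ k ih =>
    intro row a h
    rw [PySem.List.pyRange_one_cons (show (a : Int) < (row.length : Int) by omega)]
    simp only [List.foldl_cons, List.map_cons]
    rw [show PySem.List.pySetD row (a : Int) (f a) = row.set a (f a) from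
      PySem.List.pySetD_natCast row a (f a)]
    have hlen : (row.set a (f a)).length = row.length := by simp
    have hih := ih (row.set a (f a)) (a + 1) (by rw [hlen]; omega)
    rw [hlen] at hih
    rw [show ((a : Int) + 1) = ((a + 1 : Nat) : Int) by push_cast; ring] at *
    rw [hih, take_set_succ row a (f a) (by omega)]
    simp

theorem fill_row {α : Type} (f : Int → α) (row : List α) :
    (PySem.List.pyRange 0 (row.length : Int) 1).foldl (fun r j => PySem.List.pySetD r j (f j)) row
      = (PySem.List.pyRange 0 (row.length : Int) 1).map f := by
  have := fill_from f row.length row 0 (by omega)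
  simpa using this

-- A loop that repeatedly rewrites the SAME row a of the outer list is the set of that row
-- to the fold over the row's successive values.
theorem foldl_set_row {α : Type} (js : List Int) (g : α → Int → α) (d : α) :
    ∀ (m : List α) (a : Nat), a < m.length →
    js.foldl (fun mm j =>
        PySem.List.pySetD mm (a : Int) (g (PySem.List.pyGetD mm (a : Int) d) j)) m
      = m.set a (js.foldl g (PySem.List.pyGetD m (a : Int) d)) := by
  induction js with
  | nil =>
    intro m a h
    simp [PySem.List.pyGetD_natCast, List.getD_eq_getElem?_getD, List.getElem?_eq_getElem h,
      List.set_getElem_self h]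
  | cons j js ih =>
    intro m a h
    simp only [List.foldl_cons, PySem.List.pySetD_natCast, PySem.List.pyGetD_natCast]
    have hget : (m.set a (g (m.getD a d) j)).getD a d = g (m.getD a d) j := by
      simp [List.getD_eq_getElem?_getD, List.getElem?_set_self h]
    have := ih (m.set a (g (m.getD a d) j)) a (by simpa using h)
    simp only [PySem.List.pySetD_natCast, PySem.List.pyGetD_natCast] at this
    rw [this, hget, List.set_set]

-- The outer fill loop: every row of an all-length-n list is replaced by its filled value.
theorem fill_outer (n : Nat) (cell : Int → Int → Int) : ∀ (k : Nat) (m : List (List Int)) (a : Nat),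
    m.length = a + k → (∀ row ∈ m, row.length = n) →
    (PySem.List.pyRange (a : Int) (m.length : Int) 1).foldl (fun m i =>
        (PySem.List.pyRange 0 (n : Int) 1).foldl (fun mm j =>
          PySem.List.pySetD mm i (PySem.List.pySetD (PySem.List.pyGetD mm i []) j (cell i j))) m) m
      = m.take a ++ (PySem.List.pyRange (a : Int) (m.length : Int) 1).map
          (fun i => (PySem.List.pyRange 0 (n : Int) 1).map (cell i)) := by
  intro k
  induction k with
  | zero =>
    intro m a h _
    rw [PySem.List.pyRange_one_eq_nil (show (m.length : Int) ≤ (a : Int) by omega)]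
    simp [List.take_of_length_le (show m.length ≤ a by omega)]
  | succ k ih =>
    intro m a h hrows
    rw [PySem.List.pyRange_one_cons (show (a : Int) < (m.length : Int) by omega)]
    simp only [List.foldl_cons, List.map_cons]
    have ha : a < m.length := by omega
    have hrowlen : (m.getD a []).length = n := by
      have : m.getD a [] = m[a] := by
        simp [List.getD_eq_getElem?_getD, List.getElem?_eq_getElem ha]
      rw [this]; exact hrows _ (List.getElem_mem ha)
    have hstep := foldl_set_row (PySem.List.pyRange 0 (n : Int) 1)
      (fun r j => PySem.List.pySetD r j (cell (a : Int) j)) ([] : List Int) m a ha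
    rw [hstep]
    have hfill : (PySem.List.pyRange 0 (n : Int) 1).foldl
        (fun r j => PySem.List.pySetD r j (cell (a : Int) j)) (PySem.List.pyGetD m (a : Int) [])
        = (PySem.List.pyRange 0 (n : Int) 1).map (cell (a : Int)) := by
      have hg : (PySem.List.pyGetD m (a : Int) []).length = n := by
        simpa [PySem.List.pyGetD_natCast] using hrowlen
      rw [show ((n : Int)) = (((PySem.List.pyGetD m (a : Int) []).length : Nat) : Int) by
        rw [hg]]
      exact fill_row (cell (a : Int)) (PySem.List.pyGetD m (a : Int) [])
    rw [hfill]
    set v := (PySem.List.pyRange 0 (n : Int) 1).map (cell (a : Int)) with hv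
    have hlen2 : (m.set a v).length = m.length := by simp
    have hrows2 : ∀ row ∈ m.set a v, row.length = n := by
      intro row hmem
      rcases List.mem_or_eq_of_mem_set hmem with h' | h'
      · exact hrows _ h'
      · subst h'; simp [hv, PySem.List.length_pyRange_one]
    have hih := ih (m.set a v) (a + 1) (by rw [hlen2]; omega) hrows2
    rw [hlen2] at hih
    rw [show ((a : Int) + 1) = ((a + 1 : Nat) : Int) by push_cast; ring] at *
    rw [hih, take_set_succ m a v ha]
    simp

-- map over range(len(p)) of F(p[i]) is map F p
theorem map_range_get {α β : Type} (p : List α) (d : α) (F : α → β) :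
    (PySem.List.pyRange 0 (p.length : Int) 1).map (fun i => F (PySem.List.pyGetD p i d))
      = p.map F := by
  rw [show (PySem.List.pyRange 0 (p.length : Int) 1).map (fun i => F (PySem.List.pyGetD p i d))
      = ((PySem.List.pyRange 0 (p.length : Int) 1).map (fun i => PySem.List.pyGetD p i d)).map F from
    by rw [List.map_map]; rfl]
  rw [PySem.List.map_pyGetD_pyRange_zero']

-- A's cell-by-cell fill equals the selection matrix, for index lists of length n.
theorem build_eq (matrix : List (List Int)) (rp cp : List Int)
    (hr : rp.length = matrix.length) (hc : cp.length = matrix.length) :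
    (PySem.List.pyRange 0 (matrix.length : Int) 1).foldl (fun m i =>
        (PySem.List.pyRange 0 (matrix.length : Int) 1).foldl (fun mm j =>
          PySem.List.pySetD mm i (PySem.List.pySetD (PySem.List.pyGetD mm i [])
            j (PySem.List.pyGetD (PySem.List.pyGetD matrix (PySem.List.pyGetD rp i 0) [])
                 (PySem.List.pyGetD cp j 0) 0))) m)
      ((PySem.List.pyRange 0 (matrix.length : Int) 1).map (fun _ => List.replicate matrix.length (0 : Int)))
      = (rp.map (fun r => PySem.List.pyGetD matrix r [])).map
          (fun row => cp.map (fun c => PySem.List.pyGetD row c 0)) := by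
  set n := matrix.length with hn
  set init := (PySem.List.pyRange 0 (n : Int) 1).map (fun _ => List.replicate n (0 : Int)) with hinit
  have hinitlen : init.length = n := by simp [hinit, PySem.List.length_pyRange_one]
  have hfo := fill_outer n
    (fun i j => PySem.List.pyGetD (PySem.List.pyGetD matrix (PySem.List.pyGetD rp i 0) [])
      (PySem.List.pyGetD cp j 0) 0)
    n init 0 (by rw [hinitlen]; omega) (by
      intro row hrow
      simp only [hinit, List.mem_map] at hrow
      obtain ⟨_, _, h'⟩ := hrow
      simp [← h'])
  rw [hinitlen] at hfo
  rw [show ((0 : Nat) : Int) = (0 : Int) from rfl] at hfo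
  rw [hfo]
  simp only [List.take_zero, List.nil_append]
  rw [show ((n : Int)) = ((rp.length : Nat) : Int) by rw [hr, hn]]
  rw [map_range_get rp 0 (fun r => (PySem.List.pyRange 0 ((rp.length : Nat) : Int) 1).map
    (fun j => PySem.List.pyGetD (PySem.List.pyGetD matrix r [])
      (PySem.List.pyGetD cp j 0) 0))]
  rw [List.map_map]
  apply List.map_congr_left
  intro r _
  simp only [Function.comp]
  rw [show ((rp.length : Nat) : Int) = ((cp.length : Nat) : Int) by rw [hr, hc]]
  exact map_range_get cp 0 (fun c => PySem.List.pyGetD (PySem.List.pyGetD matrix r []) c 0)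

-- ---- B-side: the selection recursion IS itertools.permutations ----

theorem enumerate_eq_map_range {α : Type} (d : α) : ∀ (xs : List α) (s : Int),
    PySem.List.enumerate xs s
      = (List.range xs.length).map (fun (k : Nat) => ((s + (k : Int)), xs.getD k d)) := by
  intro xs
  induction xs with
  | nil => intro s; simp [PySem.List.enumerate_nil]
  | cons y ys ih =>
    intro s
    rw [PySem.List.enumerate_cons, ih (s + 1), List.length_cons, List.range_succ_eq_map,
      List.map_cons, List.map_map]
    congr 1
    · simp
    · apply List.map_congr_left
      intro k _
      simp only [Function.comp, List.getD_cons_succ]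
      congr 1
      push_cast; ring

theorem permutations_succ {α : Type} (xs : List α) (r : Nat) :
    PySem.List.permutations xs (r + 1)
      = (List.range xs.length).flatMap (fun i =>
          match xs[i]? with
          | none => []
          | some x => (PySem.List.permutations (xs.eraseIdx i) r).map (fun p => x :: p)) := by
  rw [PySem.List.permutations.eq_def]
  rfl

theorem flatMap_congr_mem {α β : Type} (l : List α) (f g : α → List β)
    (h : ∀ a ∈ l, f a = g a) : l.flatMap f = l.flatMap g := by
  induction l with
  | nil => rfl
  | cons x xs ih =>
    simp only [List.flatMap_cons]
    rw [h x (List.mem_cons_self), ih (fun a ha => h a (List.mem_cons_of_mem x ha))]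

-- The recursive first-element-selection generator produces exactly
-- itertools.permutations(xs, len(xs)) (same order).
theorem pvOrderings_eq_permutations : ∀ (fuel : Nat) (xs : List (List Int)),
    xs.length ≤ fuel → pvOrderings fuel xs = PySem.List.permutations xs xs.length := by
  intro fuel
  induction fuel with
  | zero =>
    intro xs h
    have : xs = [] := List.eq_nil_of_length_eq_zero (by omega)
    subst this; rfl
  | succ fuel ih =>
    intro xs h
    cases xs with
    | nil => rfl
    | cons y ys =>
      rw [show pvOrderings (fuel + 1) (y :: ys)
          = (PySem.List.enumerate (y :: ys)).flatMap (fun ix =>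
              (pvOrderings fuel (PySem.List.slice (y :: ys) none (some ix.1) ++
                                 PySem.List.slice (y :: ys) (some (ix.1 + 1)) none)).map
                (fun rest => ix.2 :: rest)) from rfl]
      rw [enumerate_eq_map_range ([] : List Int) (y :: ys) 0, List.flatMap_map]
      rw [show (y :: ys).length = ys.length + 1 from rfl, permutations_succ]
      apply flatMap_congr_mem
      intro k hk
      have hk' : k < (y :: ys).length := List.mem_range.mp hk
      have hget : (y :: ys)[k]? = some (y :: ys)[k] := List.getElem?_eq_getElem hk'
      simp only [hget, zero_add]
      rw [PySem.List.slice_to_natCast]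
      rw [show ((k : Int) + 1) = ((k + 1 : Nat) : Int) by push_cast; ring]
      rw [PySem.List.slice_from_natCast]
      rw [← List.eraseIdx_eq_take_drop_succ]
      have hel : ((y :: ys).eraseIdx k).length = ys.length := by
        rw [List.length_eraseIdx_of_lt hk']; simp
      have := ih ((y :: ys).eraseIdx k) (by
        rw [hel]
        have h' : ys.length + 1 ≤ fuel + 1 := by simpa using h
        omega)
      rw [hel] at this
      rw [this]
      congr 1
      simp [List.getD_eq_getElem?_getD, List.getElem?_eq_getElem hk']

-- permutations of a mapped list are the mapped permutations (A selects indices, B selects rows).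
theorem permutations_map {α β : Type} (f : α → β) : ∀ (r : Nat) (xs : List α),
    PySem.List.permutations (xs.map f) r = (PySem.List.permutations xs r).map (List.map f) := by
  intro r
  induction r with
  | zero => intro xs; rfl
  | succ r ih =>
    intro xs
    rw [permutations_succ, permutations_succ]
    rw [List.length_map, List.map_flatMap]
    apply flatMap_congr_mem
    intro i _
    rw [List.getElem?_map]
    cases h : xs[i]? with
    | none => rfl
    | some x =>
      simp only [Option.map_some]
      rw [List.eraseIdx_map, ih]
      simp [List.map_map, Function.comp]

-- ---- assembling the two ports ----

-- B's outer list of row-orderings is A's index permutations mapped through row selection.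
theorem orderings_as_perms (matrix : List (List Int)) :
    pvOrderings matrix.length matrix
      = (PySem.List.permutations (PySem.List.pyRange 0 (matrix.length : Int) 1) matrix.length).map
          (List.map (fun i => PySem.List.pyGetD matrix i [])) := by
  rw [pvOrderings_eq_permutations matrix.length matrix (le_refl _)]
  have h := permutations_map (fun i => PySem.List.pyGetD matrix i []) matrix.length
    (PySem.List.pyRange 0 (matrix.length : Int) 1)
  rw [PySem.List.map_pyGetD_pyRange_zero'] at h
  exact h

-- transposing the column selection gives the row/column selection matrix.
theorem transpose_select (N : Nat) (r : List (List Int)) (hr : r.length = N) (cp : List Int) :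
    pvTranspose (N : Int) (cp.map (fun c => r.map (fun row => PySem.List.pyGetD row c 0)))
      = r.map (fun row => cp.map (fun c => PySem.List.pyGetD row c 0)) := by
  unfold pvTranspose
  simp only [List.map_map]
  -- rewrite each column lookup into a row lookup, then collapse the range map
  have key : (PySem.List.pyRange 0 (N : Int) 1).map (fun i =>
        cp.map ((fun col => PySem.List.pyGetD col i 0) ∘
          fun c => r.map (fun row => PySem.List.pyGetD row c 0)))
      = (PySem.List.pyRange 0 (N : Int) 1).map (fun i =>
          cp.map (fun c => PySem.List.pyGetD (PySem.List.pyGetD r i []) c 0)) := by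
    apply List.map_congr_left
    intro i hi
    have hi' := (PySem.List.mem_pyRange_one).mp hi
    lift i to ℕ using hi'.1 with k
    apply List.map_congr_left
    intro c _
    simp only [Function.comp]
    have hk2 : k < r.length := by rw [hr]; exact_mod_cast hi'.2
    simp [PySem.List.pyGetD_natCast, List.getD_eq_getElem?_getD, List.getElem?_map,
      List.getElem?_eq_getElem hk2]
  rw [key]
  rw [show ((N : Nat) : Int) = ((r.length : Nat) : Int) by rw [hr]]
  exact map_range_get r []
    (fun row => cp.map (fun c => PySem.List.pyGetD row c 0))

-- ===== VERDICT (by name: the statement is the Claim_ definition above) =====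
theorem generate_matrices_algorithmic_spec : Claim_equal_generate_matrices_algorithmic := by
  intro matrix _ _
  unfold Spec_generate_matrices_algorithmic
  unfold generate_matrices_algorithmic generate_matrices_algorithmic_alt
  simp only []
  rw [orderings_as_perms matrix, List.foldl_map]
  apply PySem.List.foldl_congr_mem
  intro acc rp hrp
  have hrplen : rp.length = matrix.length := by
    have := PySem.List.length_of_mem_permutations hrp
    simpa [PySem.List.length_pyRange_one] using this
  -- B's inner list of column-orderings, as index permutations mapped through column selection
  have hTlen : (pvTranspose (matrix.length : Int)
      (rp.map (fun i => PySem.List.pyGetD matrix i []))).length = matrix.length := by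
    simp [pvTranspose, PySem.List.length_pyRange_one]
  have hBin : pvOrderings (pvTranspose (matrix.length : Int)
        (rp.map (fun i => PySem.List.pyGetD matrix i []))).length
      (pvTranspose (matrix.length : Int) (rp.map (fun i => PySem.List.pyGetD matrix i [])))
      = (PySem.List.permutations (PySem.List.pyRange 0 (matrix.length : Int) 1) matrix.length).map
          (List.map (fun c => (rp.map (fun i => PySem.List.pyGetD matrix i [])).map
            (fun row => PySem.List.pyGetD row c 0))) := by
    rw [pvOrderings_eq_permutations _ _ (le_refl _), hTlen]
    exact permutations_map _ matrix.length (PySem.List.pyRange 0 (matrix.length : Int) 1)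
  rw [hBin, List.foldl_map]
  apply PySem.List.foldl_congr_mem
  intro acc2 cp hcp
  have hcplen : cp.length = matrix.length := by
    have := PySem.List.length_of_mem_permutations hcp
    simpa [PySem.List.length_pyRange_one] using this
  congr 1
  rw [build_eq matrix rp cp hrplen hcplen]
  rw [transpose_select matrix.length (rp.map (fun i => PySem.List.pyGetD matrix i []))
    (by simp [hrplen]) cp]
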